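-- pv_equiv track=rewrite | github.com/as4584/repo-intelligence | src/change_radar/git/history.py | _parse_git_log_name_only
-- ===== SOURCE A (Python) =====
-- def _parse_git_log_name_only(log_text: str) -> dict[str, int]:
--     counts: dict[str, int] = {}
--     current_commit_files: set[str] = set()
--
--     def flush_current_commit() -> None:
--         for path in current_commit_files:
--             counts[path] = counts.get(path, 0) + 1
--
--     for raw_line in log_text.splitlines():
--         line = raw_line.strip()
--         if not line:
--             continue
--         if line == "__COMMIT__":
--             if current_commit_files:
--                 flush_current_commit()
--                 current_commit_files = set()
--             continue
--         current_commit_files.add(line)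
--
--     if current_commit_files:
--         flush_current_commit()
--
--     return counts
-- ===== SOURCE B (Python) =====
-- def _parse_git_log_name_only(log_text: str) -> dict[str, int]:
--     # Phase 1: normalize -- stripped, non-empty lines.
--     lines = [line for line in map(str.strip, log_text.splitlines()) if line]
--     # Phase 2: positions of the commit sentinel, plus virtual sentinels at both ends.
--     cuts = [i for i, line in enumerate(lines) if line == "__COMMIT__"]
--     bounds = [-1] + cuts + [len(lines)]
--     # Phase 3: each slice between consecutive sentinels is one commit; count its distinct paths.
--     counts: dict[str, int] = {}
--     for lo, hi in zip(bounds, bounds[1:]):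
--         for path in set(lines[lo + 1 : hi]):
--             counts[path] = counts.get(path, 0) + 1
--     return counts
-- ===== Notes on version B (the rewrite author's own statement) =====
-- stated objective: alternative
-- what changed: Replaces the mutable flush-on-sentinel state machine with a three-phase computation: normalize lines, compute sentinel index positions, then count distinct paths in each index slice between consecutive sentinels.
import Mathlib
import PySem

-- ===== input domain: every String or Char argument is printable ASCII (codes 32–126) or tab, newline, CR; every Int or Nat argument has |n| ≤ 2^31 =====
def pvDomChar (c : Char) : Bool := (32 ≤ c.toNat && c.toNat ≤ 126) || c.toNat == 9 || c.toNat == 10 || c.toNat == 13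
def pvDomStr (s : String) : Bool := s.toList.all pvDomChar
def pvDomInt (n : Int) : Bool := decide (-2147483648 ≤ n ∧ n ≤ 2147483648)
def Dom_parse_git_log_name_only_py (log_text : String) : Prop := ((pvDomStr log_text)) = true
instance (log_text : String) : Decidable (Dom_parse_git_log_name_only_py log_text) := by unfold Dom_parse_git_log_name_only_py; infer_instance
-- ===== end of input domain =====

-- B replaces A's flush-on-sentinel state machine by a three-phase computation (normalize,
-- sentinel index positions, count distinct paths per index slice); same results, same cost.
-- A returns a dict built by iterating Python sets (hash order): equality here is of the
-- counts as a dict (the ports use insertion order consistently on both sides).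

-- ===== PORT A =====
-- helper: Python's inner 'flush_current_commit' closure (counts[path] = counts.get(path, 0) + 1)
def pvFlushA (counts : PySem.Dict String Int) (cur : PySem.Set String) : PySem.Dict String Int :=
  cur.foldl (fun d path => d.insert path (d.getD path 0 + 1)) counts

def parse_git_log_name_only_py (log_text : String) : List (String × Int) :=
  let st := (PySem.Str.splitlines log_text).foldl
    (fun (st : PySem.Dict String Int × PySem.Set String) raw_line =>
      let line := PySem.Str.strip raw_line
      if line = "" then st
      else if line = "__COMMIT__" then
        (if st.2 ≠ [] then (pvFlushA st.1 st.2, PySem.Set.empty) else st)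
      else (st.1, PySem.Set.add st.2 line))
    (PySem.Dict.empty, PySem.Set.empty)
  (if st.2 ≠ [] then pvFlushA st.1 st.2 else st.1).items

-- ===== PORT B =====
def parse_git_log_name_only_py_alt (log_text : String) : List (String × Int) :=
  let lines := ((PySem.Str.splitlines log_text).map PySem.Str.strip).filter (fun l => l ≠ "")
  let cuts := ((PySem.List.enumerate lines 0).filter (fun p => p.2 == "__COMMIT__")).map (·.1)
  let bounds := [(-1 : Int)] ++ cuts ++ [(lines.length : Int)]
  let counts := (bounds.zip (PySem.List.slice bounds (some 1) none)).foldl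
    (fun c p =>
      (PySem.Set.ofList (PySem.List.slice lines (some (p.1 + 1)) (some p.2))).foldl
        (fun d path => d.insert path (d.getD path 0 + 1)) c)
    PySem.Dict.empty
  counts.items

-- ===== PRECONDITION & SPEC =====
def Spec_parse_git_log_name_only_py (log_text : String) (out : List (String × Int)) : Prop := out = parse_git_log_name_only_py_alt log_text
instance (log_text : String) (out : List (String × Int)) : Decidable (Spec_parse_git_log_name_only_py log_text out) := by unfold Spec_parse_git_log_name_only_py; infer_instance

-- ===== CLAIM (what is proved, stated in full; the proofs are below) =====
def Claim_equal_parse_git_log_name_only_py : Prop := ∀ (log_text : String), Dom_parse_git_log_name_only_py log_text → Spec_parse_git_log_name_only_py log_text (parse_git_log_name_only_py log_text)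

-- ===== LEMMAS AND PROOFS =====

-- one "count this commit's distinct files" step, on a raw segment of lines
def pvFlush (c : PySem.Dict String Int) (g : List String) : PySem.Dict String Int :=
  (PySem.Set.ofList g).foldl (fun d path => d.insert path (d.getD path 0 + 1)) c

-- A's loop, as structural recursion over the stripped non-empty lines
def pvLoopA (counts : PySem.Dict String Int) (cur : PySem.Set String) :
    List String → PySem.Dict String Int
  | [] => if cur ≠ [] then pvFlushA counts cur else counts
  | l :: ls =>
      if l = "__COMMIT__" then
        (if cur ≠ [] then pvLoopA (pvFlushA counts cur) PySem.Set.empty ls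
         else pvLoopA counts cur ls)
      else pvLoopA counts (PySem.Set.add cur l) ls

-- the segments of a line list between sentinel occurrences (sentinels removed, empties kept)
def pvSegs (ls : List String) : List (List String) :=
  match h : ls.dropWhile (fun x => !(x == "__COMMIT__")) with
  | [] => [ls.takeWhile (fun x => !(x == "__COMMIT__"))]
  | _ :: rest => ls.takeWhile (fun x => !(x == "__COMMIT__")) :: pvSegs rest
termination_by ls.length
decreasing_by
  have h1 : (ls.dropWhile (fun x => !(x == "__COMMIT__"))).length ≤ ls.length :=
    List.length_dropWhile_le _ _
  rw [h] at h1; simp at h1 ⊢; omega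

lemma pvSegs_nil_case (ls : List String) (h : ls.dropWhile (fun x => !(x == "__COMMIT__")) = []) :
    pvSegs ls = [ls.takeWhile (fun x => !(x == "__COMMIT__"))] := by
  rw [pvSegs.eq_def]; split <;> simp_all

lemma pvSegs_cons_case (ls : List String) (head : String) (rest : List String)
    (h : ls.dropWhile (fun x => !(x == "__COMMIT__")) = head :: rest) :
    pvSegs ls = ls.takeWhile (fun x => !(x == "__COMMIT__")) :: pvSegs rest := by
  rw [pvSegs.eq_def]; split
  · simp_all
  · rename_i h2; rw [h] at h2; cases h2; rfl

lemma pvLoopA_eq_segstep (ls : List String) : ∀ counts cur,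
    pvLoopA counts cur ls =
      match ls.dropWhile (fun x => !(x == "__COMMIT__")) with
      | [] => pvFlushA counts (List.foldl PySem.Set.add cur (ls.takeWhile (fun x => !(x == "__COMMIT__"))))
      | _ :: rest => pvLoopA (pvFlushA counts (List.foldl PySem.Set.add cur (ls.takeWhile (fun x => !(x == "__COMMIT__"))))) PySem.Set.empty rest := by
  induction ls with
  | nil =>
      intro counts cur
      simp only [List.dropWhile_nil, List.takeWhile_nil, List.foldl_nil, pvLoopA]
      by_cases hc : cur = []
      · subst hc; simp [pvFlushA]
      · simp [hc]
  | cons l ls ih =>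
      intro counts cur
      by_cases hl : l = "__COMMIT__"
      · subst hl
        simp only [List.dropWhile_cons, List.takeWhile_cons, beq_self_eq_true, Bool.not_true,
          Bool.false_eq_true, if_false, reduceIte, List.foldl_nil, pvLoopA]
        by_cases hc : cur = []
        · subst hc; simp [pvFlushA, PySem.Set.empty]
        · simp [hc]
      · have hb : ((l == "__COMMIT__") : Bool) = false := by simp [hl]
        simp only [List.dropWhile_cons, List.takeWhile_cons, hb, Bool.not_false, if_true,
          reduceIte, List.foldl_cons, pvLoopA, hl, if_false]
        exact ih counts (PySem.Set.add cur l)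

lemma pvLoopA_eq_segs (ls : List String) : ∀ counts,
    pvLoopA counts PySem.Set.empty ls = (pvSegs ls).foldl pvFlush counts := by
  induction ls using pvSegs.induct with
  | case1 ls h =>
      intro counts
      rw [pvLoopA_eq_segstep, pvSegs_nil_case ls h]
      simp only [h, List.foldl_cons, List.foldl_nil]
      simp [pvFlush, pvFlushA, PySem.Set.ofList_eq_foldl, PySem.Set.empty]
  | case2 ls head rest h ih =>
      intro counts
      rw [pvLoopA_eq_segstep, pvSegs_cons_case ls head rest h]
      simp only [h, List.foldl_cons]
      rw [ih]
      have heq : pvFlushA counts (List.foldl PySem.Set.add PySem.Set.empty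
            (List.takeWhile (fun x => !(x == "__COMMIT__")) ls))
          = pvFlush counts (List.takeWhile (fun x => !(x == "__COMMIT__")) ls) := by
        simp [pvFlush, pvFlushA, PySem.Set.ofList_eq_foldl, PySem.Set.empty]
      rw [heq]

lemma portA_eq_loopA (raws : List String) : ∀ counts cur,
    (let st := raws.foldl
      (fun (st : PySem.Dict String Int × PySem.Set String) raw_line =>
        let line := PySem.Str.strip raw_line
        if line = "" then st
        else if line = "__COMMIT__" then
          (if st.2 ≠ [] then (pvFlushA st.1 st.2, PySem.Set.empty) else st)
        else (st.1, PySem.Set.add st.2 line))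
      (counts, cur)
     (if st.2 ≠ [] then pvFlushA st.1 st.2 else st.1))
    = pvLoopA counts cur ((raws.map PySem.Str.strip).filter (fun l => l ≠ "")) := by
  induction raws with
  | nil => intro counts cur; simp [pvLoopA]
  | cons raw raws ih =>
      intro counts cur
      simp only [List.foldl_cons, List.map_cons, List.filter_cons]
      by_cases h0 : PySem.Str.strip raw = ""
      · simpa [h0] using ih counts cur
      · by_cases h1 : PySem.Str.strip raw = "__COMMIT__"
        · by_cases h2 : cur = []
          · subst h2; simpa [h0, h1, pvLoopA] using ih counts []
          · simpa [h0, h1, h2, pvLoopA] using ih (pvFlushA counts cur) PySem.Set.empty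
        · simpa [h0, h1, pvLoopA] using ih counts (PySem.Set.add cur (PySem.Str.strip raw))

-- sentinel cut positions starting from offset t
def pvCutsFrom (ls : List String) (t : Int) : List Int :=
  ((PySem.List.enumerate ls t).filter (fun p => p.2 == "__COMMIT__")).map (·.1)

lemma pvCutsFrom_cons (l : String) (ls : List String) (t : Int) :
    pvCutsFrom (l :: ls) t = (if l == "__COMMIT__" then [t] else []) ++ pvCutsFrom ls (t + 1) := by
  simp only [pvCutsFrom, PySem.List.enumerate_cons, List.filter_cons]
  split <;> simp_all

lemma pvCutsFrom_shift (ls : List String) : ∀ t : Int,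
    pvCutsFrom ls t = (pvCutsFrom ls 0).map (· + t) := by
  induction ls with
  | nil => intro t; simp [pvCutsFrom, PySem.List.enumerate_nil]
  | cons l ls ih =>
      intro t
      rw [pvCutsFrom_cons, pvCutsFrom_cons, ih (t + 1), ih (0 + 1), List.map_append,
        List.map_map]
      congr 1
      · split <;> simp
      · apply List.map_congr_left; intro i _; simp; ring

lemma pvCutsFrom_nonneg (ls : List String) : ∀ (t i : Int), i ∈ pvCutsFrom ls t → t ≤ i := by
  induction ls with
  | nil => intro t i h; simp [pvCutsFrom, PySem.List.enumerate_nil] at h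
  | cons l ls ih =>
      intro t i h
      rw [pvCutsFrom_cons] at h
      rcases List.mem_append.mp h with h1 | h2
      · split at h1 <;> simp at h1; omega
      · have := ih (t + 1) i h2; omega

def pvBounds (ls : List String) : List Int :=
  [(-1 : Int)] ++ pvCutsFrom ls 0 ++ [(ls.length : Int)]

lemma pvCutsFrom_append (xs ys : List String) (t : Int) :
    pvCutsFrom (xs ++ ys) t = pvCutsFrom xs t ++ pvCutsFrom ys (t + xs.length) := by
  simp [pvCutsFrom, PySem.List.enumerate_append, List.filter_append]

lemma pvCutsFrom_of_no_sentinel (ls : List String) (t : Int)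
    (h : ∀ x ∈ ls, ¬(x = "__COMMIT__")) : pvCutsFrom ls t = [] := by
  simp only [pvCutsFrom, List.map_eq_nil_iff, List.filter_eq_nil_iff]
  intro p hp
  rcases (PySem.List.mem_enumerate_iff _ _ _).mp hp with ⟨k, hk, rfl⟩
  simpa using h _ (List.getElem_mem hk)

lemma pvSliceShift (pre : List String) (x : String) (rest : List String) (c d : Int)
    (hc : -1 ≤ c) (hd : 0 ≤ d) :
    PySem.List.slice (pre ++ x :: rest) (some (c + ((pre.length : Int) + 1) + 1))
        (some (d + ((pre.length : Int) + 1)))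
      = PySem.List.slice rest (some (c + 1)) (some d) := by
  rw [PySem.List.slice_toNat _ (by omega) (by omega),
    PySem.List.slice_toNat _ (by omega) hd]
  have h1 : (c + ((pre.length : Int) + 1) + 1).toNat = (pre ++ [x]).length + (c + 1).toNat := by
    simp; omega
  have h2 : (d + ((pre.length : Int) + 1)).toNat - ((pre ++ [x]).length + (c + 1).toNat)
      = d.toNat - (c + 1).toNat := by simp; omega
  rw [h1, h2, show pre ++ x :: rest = (pre ++ [x]) ++ rest by simp,
    List.drop_length_add_append]

lemma pvSlices_eq_segs (lines : List String) :
    ((pvBounds lines).zip ((pvBounds lines).tail)).map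
      (fun p => PySem.List.slice lines (some (p.1 + 1)) (some p.2)) = pvSegs lines := by
  induction lines using pvSegs.induct with
  | case1 ls h =>
      have hall : ∀ x ∈ ls, ¬(x = "__COMMIT__") := by
        intro x hx
        have := List.dropWhile_eq_nil_iff.mp h x hx
        simpa using this
      have hcuts : pvCutsFrom ls 0 = [] := pvCutsFrom_of_no_sentinel ls 0 hall
      have htake : ls.takeWhile (fun x => !(x == "__COMMIT__")) = ls :=
        List.takeWhile_eq_self_iff.mpr (by intro x hx; simpa using hall x hx)
      rw [pvSegs_nil_case ls h, htake]
      simp only [pvBounds, hcuts, List.nil_append, List.cons_append, List.singleton_append,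
        List.tail_cons, List.zip_cons_cons, List.zip_nil_right, List.map_cons, List.map_nil]
      norm_num
  | case2 ls head rest h ih =>
      have hne : ls.dropWhile (fun x => !(x == "__COMMIT__")) ≠ [] := by simp [h]
      have hhead : head = "__COMMIT__" := by
        have h2 := List.head_dropWhile_not (fun x => !(x == "__COMMIT__")) hne
        simp only [h, List.head_cons] at h2
        simpa using h2
      have hsplit : ls = ls.takeWhile (fun x => !(x == "__COMMIT__")) ++ head :: rest := by
        conv_lhs => rw [← List.takeWhile_append_dropWhile (p := fun x => !(x == "__COMMIT__")) (l := ls)]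
        rw [h]
      set pre := ls.takeWhile (fun x => !(x == "__COMMIT__")) with hpre
      have hpreall : ∀ x ∈ pre, ¬(x = "__COMMIT__") := by
        intro x hx
        have := List.mem_takeWhile_imp hx
        simpa using this
      have hm : (ls.length : Int) = (pre.length : Int) + 1 + (rest.length : Int) := by
        rw [hsplit]; push_cast [List.length_append, List.length_cons]; ring
      have hcuts : pvCutsFrom ls 0
          = (pre.length : Int) :: (pvCutsFrom rest 0).map (· + ((pre.length : Int) + 1)) := by
        rw [hsplit, pvCutsFrom_append, pvCutsFrom_of_no_sentinel pre 0 hpreall, hhead,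
          pvCutsFrom_cons, pvCutsFrom_shift rest]
        simp only [List.nil_append, beq_self_eq_true, if_pos, List.singleton_append, zero_add]
      have hbounds : pvBounds ls = (-1) :: (pvBounds rest).map (· + ((pre.length : Int) + 1)) := by
        simp only [pvBounds, hcuts, hm, List.map_append, List.map_cons, List.map_nil]
        simp only [List.cons_append, List.nil_append, List.append_assoc]
        congr 2
        · ring
        · congr 1; ring
      have hzip : (pvBounds ls).zip (pvBounds ls).tail
          = (((-1 : Int), (pre.length : Int))) ::
            ((pvBounds rest).zip (pvBounds rest).tail).map
              (fun p => (p.1 + ((pre.length : Int) + 1), p.2 + ((pre.length : Int) + 1))) := by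
        rw [hbounds]
        have hb : pvBounds rest = (-1) :: (pvCutsFrom rest 0 ++ [(rest.length : Int)]) := by
          simp [pvBounds]
        cases hts : pvCutsFrom rest 0 ++ [(rest.length : Int)] with
        | nil => exact absurd hts (by simp)
        | cons y t =>
            rw [hb, hts]
            simp only [List.map_cons, List.tail_cons, List.zip_cons_cons]
            congr 1
            · norm_num
            · rw [show (y + ((pre.length : Int) + 1)) :: t.map (fun x => x + ((pre.length : Int) + 1))
                  = (y :: t).map (fun x => x + ((pre.length : Int) + 1)) from rfl, List.zip_map]
              simp [Prod.map]
      have hmem1 : ∀ b ∈ pvBounds rest, -1 ≤ b := by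
        intro b hb
        simp only [pvBounds, List.cons_append, List.nil_append, List.mem_cons,
          List.mem_append] at hb
        rcases hb with rfl | hb | hb
        · omega
        · have := pvCutsFrom_nonneg rest 0 b hb; omega
        · simp at hb; omega
      have hmem2 : ∀ b ∈ (pvBounds rest).tail, 0 ≤ b := by
        intro b hb
        have ht : (pvBounds rest).tail = pvCutsFrom rest 0 ++ [(rest.length : Int)] := by
          simp [pvBounds]
        rw [ht] at hb
        rcases List.mem_append.mp hb with hb | hb
        · exact pvCutsFrom_nonneg rest 0 b hb
        · simp at hb; omega
      rw [pvSegs_cons_case ls head rest h, hzip, ← hpre]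
      simp only [List.map_cons, List.map_map]
      congr 1
      · rw [show ((-1 : Int) + 1) = ((0 : Nat) : Int) by norm_num, hsplit,
          PySem.List.slice_natCast]
        simp only [List.drop_zero, Nat.sub_zero]
        exact List.take_left
      · rw [← ih]
        apply List.map_congr_left
        intro p hp
        obtain ⟨a, b⟩ := p
        rcases List.of_mem_zip hp with ⟨hp1, hp2⟩
        have hc : -1 ≤ a := hmem1 a hp1
        have hd : 0 ≤ b := hmem2 b hp2
        simp only [Function.comp]
        rw [hsplit]
        exact pvSliceShift pre head rest a b hc hd

-- ===== VERDICT (by name: the statement is the Claim_ definition above) =====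
theorem parse_git_log_name_only_py_spec : Claim_equal_parse_git_log_name_only_py := by
  intro log_text _
  unfold Spec_parse_git_log_name_only_py
  have hA := congrArg PySem.Dict.items
    (portA_eq_loopA (PySem.Str.splitlines log_text) PySem.Dict.empty PySem.Set.empty)
  rw [pvLoopA_eq_segs] at hA
  have hB : parse_git_log_name_only_py_alt log_text
      = (((((pvBounds (((PySem.Str.splitlines log_text).map PySem.Str.strip).filter (fun l => l ≠ ""))).zip
            ((pvBounds (((PySem.Str.splitlines log_text).map PySem.Str.strip).filter (fun l => l ≠ ""))).tail)).map
          (fun p => PySem.List.slice (((PySem.Str.splitlines log_text).map PySem.Str.strip).filter (fun l => l ≠ ""))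
            (some (p.1 + 1)) (some p.2))).foldl pvFlush PySem.Dict.empty)).items := by
    unfold parse_git_log_name_only_py_alt pvBounds pvCutsFrom
    simp only [PySem.List.slice_from_one, List.foldl_map, pvFlush]
  rw [pvSlices_eq_segs] at hB
  exact hA.trans hB.symm
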